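-- pv_equiv track=rewrite | github.com/geraldpe/ObjectOrientedChessGame | movements.py | foolPossibleMovements
-- ===== SOURCE A (Python) =====
-- def foolPossibleMovements(coordinates: tuple):
--     trajectoires = [[], [], [], []]
--     microPosition = ["", ""]
--     i = 1
--     while i <= 8:
--         microPosition = list(coordinates) #reinitialisation de microPosition
--
--         microPosition[0] = coordinates[0] + i
--         microPosition[1] = coordinates[1] + i
--         if (0 <= microPosition[0] < 8) and (0 <= microPosition[1] < 8):
--             trajectoires[0].append(microPosition)
--
--         microPosition = list(coordinates) #same
--
--         microPosition[0] = coordinates[0] - i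
--         microPosition[1] = coordinates[1] - i
--         if (0 <= microPosition[0] < 8) and (0 <= microPosition[1] < 8):
--             trajectoires[1].append(microPosition)
--
--         microPosition = list(coordinates) #same
--
--         microPosition[1] = coordinates[1] - i
--         microPosition[0] = coordinates[0] + i
--         if (0 <= microPosition[0] < 8) and (0 <= microPosition[1] < 8):
--             trajectoires[2].append(microPosition)
--
--         microPosition = list(coordinates) #same
--
--         microPosition[1] = coordinates[1] + i
--         microPosition[0] = coordinates[0] - i
--         if (0 <= microPosition[0] < 8) and (0 <= microPosition[1] < 8):
--             trajectoires[3].append(microPosition)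
--         i += 1
--     return trajectoires
-- ===== SOURCE B (Python) =====
-- def foolPossibleMovements(coordinates: tuple):
--     x, y = coordinates
--
--     def bounds(c, d):
--         # steps i (as an interval) with 0 <= c + i*d < 8, for d in {1, -1}
--         return (-c, 7 - c) if d == 1 else (c - 7, c)
--
--     result = []
--     for dx, dy in ((1, 1), (-1, -1), (1, -1), (-1, 1)):
--         xlo, xhi = bounds(x, dx)
--         ylo, yhi = bounds(y, dy)
--         lo = max(1, xlo, ylo)
--         hi = min(8, xhi, yhi)
--         result.append([[x + i * dx, y + i * dy] for i in range(lo, hi + 1)])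
--     return result
-- ===== Notes on version B (the rewrite author's own statement) =====
-- stated objective: simpler
-- what changed: A tests 0<=coord<8 on both axes at every one of 8 loop steps for all four directions; B computes, per direction, the closed-form step interval [lo,hi] from the board limits (coordinates are monotonic in the step) and emits each sublist as a single range comprehension with no per-step membership test.
import Mathlib
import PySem

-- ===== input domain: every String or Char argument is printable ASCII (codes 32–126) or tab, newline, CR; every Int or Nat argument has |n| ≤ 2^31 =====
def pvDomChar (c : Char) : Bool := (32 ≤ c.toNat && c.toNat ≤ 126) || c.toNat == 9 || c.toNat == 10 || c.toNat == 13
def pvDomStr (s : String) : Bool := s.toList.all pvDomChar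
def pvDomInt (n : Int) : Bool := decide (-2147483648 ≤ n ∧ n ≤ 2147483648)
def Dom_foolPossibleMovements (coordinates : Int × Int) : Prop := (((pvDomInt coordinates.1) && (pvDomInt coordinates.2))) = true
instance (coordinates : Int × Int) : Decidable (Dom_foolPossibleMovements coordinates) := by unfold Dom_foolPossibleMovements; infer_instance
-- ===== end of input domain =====

-- B replaces A's per-step bounds test in an 8-iteration loop by a closed-form step interval
-- [lo, hi] per diagonal direction (objective: simpler — no membership test per step).

-- ===== PORT A =====
-- while i <= 8: four conditional appends to trajectoires[0..3]; state is the 4 lists.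
def foolPossibleMovements (coordinates : Int × Int) : List (List (List Int)) :=
  let x := coordinates.1
  let y := coordinates.2
  let s := (PySem.List.pyRange 1 9 1).foldl
    (fun (t : List (List Int) × List (List Int) × List (List Int) × List (List Int)) i =>
      (if (0 ≤ x + i ∧ x + i < 8) ∧ (0 ≤ y + i ∧ y + i < 8) then t.1 ++ [[x + i, y + i]] else t.1,
       if (0 ≤ x - i ∧ x - i < 8) ∧ (0 ≤ y - i ∧ y - i < 8) then t.2.1 ++ [[x - i, y - i]] else t.2.1,
       if (0 ≤ x + i ∧ x + i < 8) ∧ (0 ≤ y - i ∧ y - i < 8) then t.2.2.1 ++ [[x + i, y - i]] else t.2.2.1,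
       if (0 ≤ x - i ∧ x - i < 8) ∧ (0 ≤ y + i ∧ y + i < 8) then t.2.2.2 ++ [[x - i, y + i]] else t.2.2.2))
    ([], [], [], [])
  [s.1, s.2.1, s.2.2.1, s.2.2.2]

-- ===== PORT B =====
-- bounds(c, d): the step interval i with 0 <= c + i*d < 8, for d in {1, -1}
def pvBounds (c d : Int) : Int × Int := if d = 1 then (-c, 7 - c) else (c - 7, c)

def foolPossibleMovements_alt (coordinates : Int × Int) : List (List (List Int)) :=
  let x := coordinates.1
  let y := coordinates.2
  ([(1, 1), (-1, -1), (1, -1), (-1, 1)] : List (Int × Int)).map (fun d =>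
    let bx := pvBounds x d.1
    let by' := pvBounds y d.2
    let lo := max (max 1 bx.1) by'.1
    let hi := min (min 8 bx.2) by'.2
    (PySem.List.pyRange lo (hi + 1) 1).map (fun i => [x + i * d.1, y + i * d.2]))

-- ===== PRECONDITION & SPEC =====
def Spec_foolPossibleMovements (coordinates : Int × Int) (out : List (List (List Int))) : Prop := out = foolPossibleMovements_alt coordinates
instance (coordinates : Int × Int) (out : List (List (List Int))) : Decidable (Spec_foolPossibleMovements coordinates out) := by unfold Spec_foolPossibleMovements; infer_instance

-- ===== CLAIM (what is proved, stated in full; the proofs are below) =====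
def Claim_equal_foolPossibleMovements : Prop := ∀ (coordinates : Int × Int), Dom_foolPossibleMovements coordinates → Spec_foolPossibleMovements coordinates (foolPossibleMovements coordinates)

-- ===== LEMMAS AND PROOFS =====

-- A's single loop appends to the four lists independently: it is four filter-then-maps.
lemma pv_foldl_quad_append (P0 P1 P2 P3 : Int → Prop) [DecidablePred P0] [DecidablePred P1]
    [DecidablePred P2] [DecidablePred P3] (f0 f1 f2 f3 : Int → List Int) (l : List Int)
    (a b c d : List (List Int)) :
    l.foldl (fun t i =>
        (if P0 i then t.1 ++ [f0 i] else t.1,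
         if P1 i then t.2.1 ++ [f1 i] else t.2.1,
         if P2 i then t.2.2.1 ++ [f2 i] else t.2.2.1,
         if P3 i then t.2.2.2 ++ [f3 i] else t.2.2.2)) (a, b, c, d) =
      (a ++ (l.filter (fun i => decide (P0 i))).map f0,
       b ++ (l.filter (fun i => decide (P1 i))).map f1,
       c ++ (l.filter (fun i => decide (P2 i))).map f2,
       d ++ (l.filter (fun i => decide (P3 i))).map f3) := by
  induction l generalizing a b c d with
  | nil => simp
  | cons h t ih =>
    simp only [List.foldl_cons, ih]
    by_cases h0 : P0 h <;> by_cases h1 : P1 h <;> by_cases h2 : P2 h <;> by_cases h3 : P3 h <;>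
      simp [h0, h1, h2, h3]

-- Filtering range 1..8 by an interval condition is the clipped interval itself.
lemma pv_filter_interval (lo hi : Int) (h1 : 1 ≤ lo) (h4 : hi ≤ 8) :
    (PySem.List.pyRange 1 9 1).filter (fun i => decide (lo ≤ i ∧ i ≤ hi)) =
      PySem.List.pyRange lo (hi + 1) 1 := by
  by_cases h : hi + 1 ≤ lo
  · rw [PySem.List.pyRange_one_eq_nil h, List.filter_eq_nil_iff]
    intro i hi'
    rw [PySem.List.mem_pyRange_one] at hi'
    simp only [decide_eq_true_eq, not_and]
    omega
  · push Not at h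
    rw [PySem.List.pyRange_one_append 1 lo 9 h1 (by omega),
        PySem.List.pyRange_one_append lo (hi + 1) 9 (by omega) (by omega),
        List.filter_append, List.filter_append]
    have e1 : (PySem.List.pyRange 1 lo 1).filter (fun i => decide (lo ≤ i ∧ i ≤ hi)) = [] := by
      rw [List.filter_eq_nil_iff]
      intro i hi'
      rw [PySem.List.mem_pyRange_one] at hi'
      simp only [decide_eq_true_eq, not_and]; omega
    have e2 : (PySem.List.pyRange lo (hi + 1) 1).filter (fun i => decide (lo ≤ i ∧ i ≤ hi)) =
        PySem.List.pyRange lo (hi + 1) 1 := by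
      rw [List.filter_eq_self]
      intro i hi'
      rw [PySem.List.mem_pyRange_one] at hi'
      simp only [decide_eq_true_eq]; omega
    have e3 : (PySem.List.pyRange (hi + 1) 9 1).filter (fun i => decide (lo ≤ i ∧ i ≤ hi)) = [] := by
      rw [List.filter_eq_nil_iff]
      intro i hi'
      rw [PySem.List.mem_pyRange_one] at hi'
      simp only [decide_eq_true_eq, not_and]; omega
    rw [e1, e2, e3, List.nil_append, List.append_nil]

-- One diagonal direction: A's filtered range equals B's clipped interval, mapped.
lemma pv_dir (P : Int → Prop) [DecidablePred P] (f : Int → List Int) (lo hi : Int)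
    (h1 : 1 ≤ lo) (h4 : hi ≤ 8)
    (hiff : ∀ i, 1 ≤ i → i < 9 → (P i ↔ lo ≤ i ∧ i ≤ hi)) :
    ((PySem.List.pyRange 1 9 1).filter (fun i => decide (P i))).map f =
      (PySem.List.pyRange lo (hi + 1) 1).map f := by
  have : (PySem.List.pyRange 1 9 1).filter (fun i => decide (P i)) =
      (PySem.List.pyRange 1 9 1).filter (fun i => decide (lo ≤ i ∧ i ≤ hi)) := by
    apply List.filter_congr
    intro i hi'
    rw [PySem.List.mem_pyRange_one] at hi'
    simp only [decide_eq_decide]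
    exact hiff i hi'.1 hi'.2
  rw [this, pv_filter_interval lo hi h1 h4]

-- ===== VERDICT (by name: the statement is the Claim_ definition above) =====
theorem foolPossibleMovements_spec : Claim_equal_foolPossibleMovements := by
  intro ⟨x, y⟩ _
  show _ = _
  unfold foolPossibleMovements foolPossibleMovements_alt
  simp only [List.map_cons, List.map_nil, pvBounds]
  rw [pv_foldl_quad_append]
  simp only [List.nil_append, show ((-1 : Int) = 1) = False by decide, if_true, if_false, mul_one, mul_neg_one,
    ← sub_eq_add_neg, List.cons.injEq, and_true]
  refine ⟨?_, ?_, ?_, ?_⟩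
  · rw [pv_dir _ _ (max (max 1 (-x)) (-y)) (min (min 8 (7 - x)) (7 - y)) (by omega) (by omega)
      (by intro i h1 h2; omega)]
  · rw [pv_dir _ _ (max (max 1 (x - 7)) (y - 7)) (min (min 8 x) y) (by omega) (by omega)
      (by intro i h1 h2; omega)]
  · rw [pv_dir _ _ (max (max 1 (-x)) (y - 7)) (min (min 8 (7 - x)) y) (by omega) (by omega)
      (by intro i h1 h2; omega)]
  · rw [pv_dir _ _ (max (max 1 (x - 7)) (-y)) (min (min 8 x) (7 - y)) (by omega) (by omega)
      (by intro i h1 h2; omega)]
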